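-- pv_equiv track=rewrite | github.com/Jihyun-Choi/Algorithm | BOJ/python/backtracking/1208.py | dfs
-- ===== SOURCE A (Python) =====
-- def dfs(arr):
--     result = {0:1}
--     for i in arr:
--         temp = result.copy()
--         for j in temp:
--             if j+i in temp:
--                 result[j+i] += temp[j]
--             else:
--                 result[j+i] = temp[j]
--     return result
-- ===== SOURCE B (Python) =====
-- def dfs(arr):
--     # Tally every subset of arr by explicit recursion: with i elements still
--     # undecided, either leave arr[i-1] out or add it to the running sum s,
--     # and count the sum once per subset at the leaves.
--     result = {}
--
--     def rec(i, s):
--         if i == 0: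
--             result[s] = result.get(s, 0) + 1
--         else:
--             rec(i - 1, s)
--             rec(i - 1, s + arr[i - 1])
--
--     rec(len(arr), 0)
--     return result
-- ===== Notes on version B (the rewrite author's own statement) =====
-- stated objective: alternative
-- what changed: B replaces A's dict DP (per element, merge the shifted copy of the sum->count table into itself) by an explicit recursive enumeration of all 2^n subsets that tallies each subset's sum once at the leaf.
import Mathlib
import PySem

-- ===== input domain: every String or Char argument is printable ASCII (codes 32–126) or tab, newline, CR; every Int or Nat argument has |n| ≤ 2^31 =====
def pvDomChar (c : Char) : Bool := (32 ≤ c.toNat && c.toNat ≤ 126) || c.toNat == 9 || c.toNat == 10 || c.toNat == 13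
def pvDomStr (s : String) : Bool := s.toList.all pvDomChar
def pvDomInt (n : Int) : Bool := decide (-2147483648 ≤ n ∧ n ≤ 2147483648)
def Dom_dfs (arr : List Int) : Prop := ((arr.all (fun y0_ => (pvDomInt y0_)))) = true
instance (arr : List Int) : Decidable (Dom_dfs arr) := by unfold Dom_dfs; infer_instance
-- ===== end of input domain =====

-- B replaces A's in-place dict DP by an explicit recursive enumeration of all subsets,
-- tallying each subset's sum at the leaves (alternative decomposition; exponential vs A's
-- per-distinct-sum DP); return values proved equal on all inputs.


-- ===== PORT A =====
-- result = {0:1}; for i in arr: temp = result.copy(); for j in temp: … ; return result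
-- (result[j+i] += temp[j] reads result[j+i], which is always present there since j+i ∈ temp ⊆ result:
--  ported as getD res (j+i) 0, exact because the key is present)
def dfs (arr : List Int) : List (Int × Int) :=
  (arr.foldl
    (fun result i =>
      let temp := result
      temp.keys.foldl
        (fun res j =>
          if (PySem.Dict.get? temp (j + i)).isSome then
            PySem.Dict.insert res (j + i)
              (PySem.Dict.getD res (j + i) 0 + PySem.Dict.getD temp j 0)
          else
            PySem.Dict.insert res (j + i) (PySem.Dict.getD temp j 0))
        result)
    (PySem.Dict.insert (PySem.Dict.empty : PySem.Dict Int Int) 0 1)).items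

-- ===== PORT B =====
-- rec(i, s): if i == 0: result[s] = result.get(s, 0) + 1 else: rec(i-1, s); rec(i-1, s + arr[i-1])
-- (arr[i-1] is always in range — rec is only called with i ≤ len(arr) — so List.getD is exact)
def recB (arr : List Int) : Nat → Int → PySem.Dict Int Int → PySem.Dict Int Int
  | 0, s, result => PySem.Dict.insert result s (PySem.Dict.getD result s 0 + 1)
  | i + 1, s, result => recB arr i (s + arr.getD i 0) (recB arr i s result)

def dfs_alt (arr : List Int) : List (Int × Int) :=
  (recB arr arr.length 0 (PySem.Dict.empty : PySem.Dict Int Int)).items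

-- ===== PRECONDITION & SPEC =====
def Spec_dfs (arr : List Int) (out : List (Int × Int)) : Prop := out = dfs_alt arr
instance (arr : List Int) (out : List (Int × Int)) : Decidable (Spec_dfs arr out) := by unfold Spec_dfs; infer_instance

-- ===== CLAIM (what is proved, stated in full; the proofs are below) =====
def Claim_equal_dfs : Prop := ∀ (arr : List Int), Dom_dfs arr → Spec_dfs arr (dfs arr)

-- ===== LEMMAS AND PROOFS =====

-- number of sublists of l summing to s (as an Int, the dicts' value type)
def cnt : List Int → Int → Int
  | [], s => if s = 0 then 1 else 0
  | a :: l, s => cnt l s + cnt l (s - a)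

-- one step of A's key order: old keys, then the fresh shifted keys in old-key order
def stepO (O : List Int) (x : Int) : List Int :=
  O ++ (O.filter (fun k => !O.contains (k + x))).map (fun k => k + x)

def ordF (arr : List Int) : List Int := arr.foldl stepO [0]

-- A's dict state midway through the inner loop, after the prefix P of the keys O was processed
def midA (O P : List Int) (i : Int) (c : Int → Int) : PySem.Dict Int Int :=
  PySem.Dict.mk (O.map (fun s => (s, c s + if s - i ∈ P then c (s - i) else 0)) ++
    (P.filter (fun j => !O.contains (j + i))).map (fun j => (j + i, c j)))

theorem cnt_nonneg (l : List Int) (s : Int) : 0 ≤ cnt l s := by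
  induction l generalizing s with
  | nil => simp [cnt]; split <;> norm_num
  | cons a l ih => simpa [cnt] using add_nonneg (ih s) (ih (s - a))

theorem cnt_append (p : List Int) (x : Int) (s : Int) :
    cnt (p ++ [x]) s = cnt p s + cnt p (s - x) := by
  induction p generalizing s with
  | nil => simp [cnt]
  | cons a p ih =>
    simp only [List.cons_append, cnt, ih]
    have : s - a - x = s - x - a := by ring
    rw [this]; ring

theorem get?_mk_map (O : List Int) (g : Int → Int) (k : Int) :
    (PySem.Dict.mk (O.map (fun s => (s, g s)))).get? k = if k ∈ O then some (g k) else none := by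
  induction O with
  | nil => simp [PySem.Dict.get?]
  | cons a O ih =>
    simp only [List.map_cons]
    rw [PySem.Dict.get?_mk_cons]
    by_cases hk : a = k
    · subst hk; simp
    · simp [hk, ih, Ne.symm hk]

theorem get?_mk_shift (L : List Int) (i : Int) (g : Int → Int) (k : Int) :
    (PySem.Dict.mk (L.map (fun j => (j + i, g j)))).get? k =
      if k - i ∈ L then some (g (k - i)) else none := by
  induction L with
  | nil => simp [PySem.Dict.get?]
  | cons a L ih =>
    simp only [List.map_cons]
    rw [PySem.Dict.get?_mk_cons]
    by_cases hk : a + i = k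
    · have : k - i = a := by omega
      simp [hk, this]
    · have h2 : ¬ (k - i = a) := by omega
      simp [hk, ih, h2]

theorem get?_mk_append (L₁ L₂ : List (Int × Int)) (k : Int) :
    (PySem.Dict.mk (L₁ ++ L₂)).get? k =
      ((PySem.Dict.mk L₁).get? k).or ((PySem.Dict.mk L₂).get? k) := by
  induction L₁ with
  | nil => simp [PySem.Dict.get?]
  | cons p L₁ ih =>
    obtain ⟨a, v⟩ := p
    rw [List.cons_append, PySem.Dict.get?_mk_cons, PySem.Dict.get?_mk_cons]
    by_cases hk : a = k
    · simp [hk]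
    · simp [hk, ih]

theorem get?_midA (O P : List Int) (i : Int) (c : Int → Int) (k : Int) :
    (midA O P i c).get? k =
      if k ∈ O then some (c k + if k - i ∈ P then c (k - i) else 0)
      else if k - i ∈ P.filter (fun j => !O.contains (j + i)) then some (c (k - i)) else none := by
  unfold midA
  rw [get?_mk_append, get?_mk_map, get?_mk_shift]
  by_cases hk : k ∈ O <;> simp [hk]

theorem ordF_inv (p : List Int) :
    (ordF p).Nodup ∧ ∀ s : Int, s ∈ ordF p ↔ cnt p s ≠ 0 := by
  induction p using List.reverseRecOn with
  | nil =>
    constructor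
    · simp [ordF]
    · intro s
      simp only [ordF, List.foldl_nil, List.mem_singleton, cnt]
      constructor
      · rintro rfl; simp
      · intro h; by_contra hs; simp [hs] at h
  | append_singleton p x ih =>
    obtain ⟨hnd, hmem⟩ := ih
    have hstep : ordF (p ++ [x]) = stepO (ordF p) x := by
      simp [ordF, List.foldl_append]
    constructor
    · rw [hstep]
      unfold stepO
      apply List.Nodup.append hnd
      · apply List.Nodup.map
        · intro a b hab; simpa using hab
        · exact hnd.filter _
      · intro y hy hmapy
        simp only [List.mem_map, List.mem_filter] at hmapy
        obtain ⟨k, ⟨hk, hkc⟩, rfl⟩ := hmapy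
        simp at hkc
        exact hkc hy
    · intro s
      rw [hstep, cnt_append]
      unfold stepO
      simp only [List.mem_append, List.mem_map, List.mem_filter, Bool.not_eq_true',
        List.contains_eq_mem, decide_eq_false_iff_not]
      have n1 := cnt_nonneg p s
      have n2 := cnt_nonneg p (s - x)
      constructor
      · rintro (hs | ⟨k, ⟨hk, hknot⟩, rfl⟩)
        · have := (hmem s).mp hs; omega
        · have := (hmem k).mp hk
          have n3 := cnt_nonneg p k
          simp only [Int.add_sub_cancel]
          omega
      · intro h
        by_cases hs : s ∈ ordF p
        · exact Or.inl hs
        · right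
          have hcs : cnt p s = 0 := by
            by_contra hne; exact hs ((hmem s).mpr hne)
          have : cnt p (s - x) ≠ 0 := by omega
          refine ⟨s - x, ⟨(hmem (s - x)).mpr this, ?_⟩, by ring⟩
          have : s - x + x = s := by ring
          rw [this]; exact hs

-- one step of A's inner loop, seen on the midway state
theorem keyA (O P : List Int) (i : Int) (c : Int → Int) (j : Int)
    (hjO : j ∈ O) (hjP : j ∉ P) :
    (if ((PySem.Dict.mk (O.map (fun s => (s, c s)))).get? (j + i)).isSome then
        PySem.Dict.insert (midA O P i c) (j + i)
          (PySem.Dict.getD (midA O P i c) (j + i) 0 +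
            PySem.Dict.getD (PySem.Dict.mk (O.map (fun s => (s, c s)))) j 0)
      else
        PySem.Dict.insert (midA O P i c) (j + i)
          (PySem.Dict.getD (PySem.Dict.mk (O.map (fun s => (s, c s)))) j 0))
      = midA O (P ++ [j]) i c := by
  have htempj : PySem.Dict.getD (PySem.Dict.mk (O.map (fun s => (s, c s)))) j 0 = c j := by
    simp [PySem.Dict.getD, get?_mk_map, hjO]
  by_cases hT : j + i ∈ O
  · rw [if_pos (by simp [get?_mk_map, hT])]
    have hmid : PySem.Dict.getD (midA O P i c) (j + i) 0 = c (j + i) := by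
      simp [PySem.Dict.getD, get?_midA, hT, hjP]
    rw [hmid, htempj]
    have hcont : (midA O P i c).contains (j + i) = true := by
      rw [PySem.Dict.contains_eq_isSome_get?, get?_midA]
      simp [hT]
    unfold PySem.Dict.insert
    rw [if_pos hcont]
    unfold midA
    congr 1
    rw [List.map_append, List.map_map]
    congr 1
    · apply List.map_congr_left
      intro s hs
      by_cases hsj : s = j + i
      · subst hsj
        simp only [Function.comp_apply, beq_self_eq_true, if_pos, Int.add_sub_cancel]
        have : j ∈ P ++ [j] := by simp
        simp [this]
      · have heq : (s - i ∈ P ++ [j]) ↔ (s - i ∈ P) := by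
          simp only [List.mem_append, List.mem_singleton]
          constructor
          · rintro (h | h); · exact h
            · exfalso; apply hsj; omega
          · exact Or.inl
        simp only [Function.comp_apply]
        rw [if_neg (by simp [hsj])]
        simp [heq]
    · have hfil : (P ++ [j]).filter (fun k => !O.contains (k + i)) =
          P.filter (fun k => !O.contains (k + i)) := by
        rw [List.filter_append]
        simp [hT]
      rw [hfil, List.map_map]
      apply List.map_congr_left
      intro y hy
      simp only [List.mem_filter] at hy
      have hyj : y + i ≠ j + i := by
        intro h
        have : y = j := by omega
        exact hjP (this ▸ hy.1)
      simp [hyj]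
  · rw [if_neg (by simp [get?_mk_map, hT])]
    rw [htempj]
    have hcont : (midA O P i c).contains (j + i) = false := by
      rw [PySem.Dict.contains_eq_isSome_get?, get?_midA]
      have : j + i - i ∉ P.filter (fun k => !O.contains (k + i)) := by
        simp only [Int.add_sub_cancel, List.mem_filter]
        rintro ⟨h, _⟩; exact hjP h
      simp [hT, hjP]
    unfold PySem.Dict.insert
    rw [if_neg (by simp [hcont])]
    unfold midA
    congr 1
    have hfirst : O.map (fun s => (s, c s + if s - i ∈ P ++ [j] then c (s - i) else 0)) =
        O.map (fun s => (s, c s + if s - i ∈ P then c (s - i) else 0)) := by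
      apply List.map_congr_left
      intro s hs
      have heq : (s - i ∈ P ++ [j]) ↔ (s - i ∈ P) := by
        simp only [List.mem_append, List.mem_singleton]
        constructor
        · rintro (h | h); · exact h
          · exfalso; apply hT; have : s = j + i := by omega
            exact this ▸ hs
        · exact Or.inl
      simp only [heq]
    have hsec : (P ++ [j]).filter (fun k => !O.contains (k + i)) =
        P.filter (fun k => !O.contains (k + i)) ++ [j] := by
      rw [List.filter_append]
      simp [hT]
    rw [hfirst, hsec, List.map_append]
    simp [List.append_assoc]

theorem loopA (O : List Int) (i : Int) (c : Int → Int) (hnd : O.Nodup) :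
    ∀ S P, O = P ++ S →
      S.foldl
        (fun res j =>
          if ((PySem.Dict.mk (O.map (fun s => (s, c s)))).get? (j + i)).isSome then
            PySem.Dict.insert res (j + i)
              (PySem.Dict.getD res (j + i) 0 +
                PySem.Dict.getD (PySem.Dict.mk (O.map (fun s => (s, c s)))) j 0)
          else
            PySem.Dict.insert res (j + i)
              (PySem.Dict.getD (PySem.Dict.mk (O.map (fun s => (s, c s)))) j 0))
        (midA O P i c)
      = midA O O i c := by
  intro S
  induction S with
  | nil =>
    intro P hP
    have : P = O := by simpa using hP.symm
    rw [this, List.foldl_nil]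
  | cons j S ih =>
    intro P hP
    rw [List.foldl_cons]
    have hjO : j ∈ O := by rw [hP]; simp
    have hjP : j ∉ P := by
      intro hmem
      rw [hP] at hnd
      exact (List.disjoint_of_nodup_append hnd) hmem (by simp)
    rw [keyA O P i c j hjO hjP]
    exact ih (P ++ [j]) (by rw [hP]; simp)

theorem innerA (O : List Int) (i : Int) (c : Int → Int)
    (hnd : O.Nodup) (hc : ∀ s, s ∉ O → c s = 0) :
    O.foldl
      (fun res j =>
        if ((PySem.Dict.mk (O.map (fun s => (s, c s)))).get? (j + i)).isSome then
          PySem.Dict.insert res (j + i)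
            (PySem.Dict.getD res (j + i) 0 +
              PySem.Dict.getD (PySem.Dict.mk (O.map (fun s => (s, c s)))) j 0)
        else
          PySem.Dict.insert res (j + i)
            (PySem.Dict.getD (PySem.Dict.mk (O.map (fun s => (s, c s)))) j 0))
      (PySem.Dict.mk (O.map (fun s => (s, c s))))
    = PySem.Dict.mk ((stepO O i).map (fun s => (s, c s + c (s - i)))) := by
  have hstart : PySem.Dict.mk (O.map (fun s => (s, c s))) = midA O [] i c := by
    unfold midA; simp
  have hloop := loopA O i c hnd O [] (by simp)
  rw [← hstart] at hloop
  rw [hloop]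
  unfold midA stepO
  congr 1
  rw [List.map_append, List.map_map]
  congr 1
  · apply List.map_congr_left
    intro s hs
    by_cases h : s - i ∈ O
    · simp [h]
    · simp [h, hc _ h]
  · apply List.map_congr_left
    intro y hy
    simp only [List.mem_filter, Bool.not_eq_true', List.contains_eq_mem,
      decide_eq_false_iff_not] at hy
    simp [Function.comp, hc _ hy.2]

theorem dfs_eq_canon (arr : List Int) :
    dfs arr = (ordF arr).map (fun s => (s, cnt arr s)) := by
  unfold dfs
  have main :
      arr.foldl
        (fun result i =>
          let temp := result
          temp.keys.foldl
            (fun res j =>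
              if (PySem.Dict.get? temp (j + i)).isSome then
                PySem.Dict.insert res (j + i)
                  (PySem.Dict.getD res (j + i) 0 + PySem.Dict.getD temp j 0)
              else
                PySem.Dict.insert res (j + i) (PySem.Dict.getD temp j 0))
            result)
        (PySem.Dict.insert (PySem.Dict.empty : PySem.Dict Int Int) 0 1)
      = PySem.Dict.mk ((ordF arr).map (fun s => (s, cnt arr s))) := by
    induction arr using List.reverseRecOn with
    | nil =>
      show PySem.Dict.insert (PySem.Dict.empty : PySem.Dict Int Int) 0 1 = _
      decide
    | append_singleton p x ih =>
      rw [List.foldl_append, ih, List.foldl_cons, List.foldl_nil]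
      obtain ⟨hnd, hmem⟩ := ordF_inv p
      have hkeys : (PySem.Dict.mk ((ordF p).map (fun s => (s, cnt p s)))).keys = ordF p := by
        simp only [PySem.Dict.keys, List.map_map]
        have h : ((fun x : Int × Int => x.1) ∘ fun s : Int => (s, cnt p s)) = fun s => s := rfl
        rw [h, List.map_id']
      show (PySem.Dict.mk ((ordF p).map (fun s => (s, cnt p s)))).keys.foldl _ _ = _
      rw [hkeys]
      have hc : ∀ s, s ∉ ordF p → cnt p s = 0 := by
        intro s hs
        by_contra hne
        exact hs ((hmem s).mpr hne)
      rw [innerA (ordF p) x (cnt p) hnd hc]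
      have hord : ordF (p ++ [x]) = stepO (ordF p) x := by
        simp [ordF, List.foldl_append]
      rw [hord]
      congr 1
      apply List.map_congr_left
      intro s hs
      rw [cnt_append]
  rw [main]

-- ===== B-side lemmas =====

-- the leaf sums of recB's call tree, in visit order (with multiplicity)
def leafL (arr : List Int) : Nat → Int → List Int
  | 0, s => [s]
  | i + 1, s => leafL arr i s ++ leafL arr i (s + arr.getD i 0)

theorem recB_eq_foldl (arr : List Int) (i : Nat) :
    ∀ (s : Int) (d : PySem.Dict Int Int),
      recB arr i s d =
        (leafL arr i s).foldl (fun d t => PySem.Dict.insert d t (PySem.Dict.getD d t 0 + 1)) d := by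
  induction i with
  | zero => intro s d; simp [recB, leafL]
  | succ i ih =>
    intro s d
    rw [recB, leafL, List.foldl_append, ← ih, ← ih]

theorem leafL_shift (arr : List Int) (i : Nat) :
    ∀ s : Int, leafL arr i s = (leafL arr i 0).map (fun t => s + t) := by
  induction i with
  | zero => intro s; simp [leafL]
  | succ i ih =>
    intro s
    rw [leafL, leafL, ih s, ih (s + arr.getD i 0), ih (0 + arr.getD i 0), List.map_append,
      List.map_map]
    congr 1
    apply List.map_congr_left
    intro t _
    simp only [Function.comp_apply]
    ring

theorem count_leafL (arr : List Int) (i : Nat) (h : i ≤ arr.length) :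
    ∀ (s t : Int), ((leafL arr i s).count t : Int) = cnt (arr.take i) (t - s) := by
  induction i with
  | zero =>
    intro s t
    simp only [leafL, List.take_zero, cnt]
    by_cases hst : t = s
    · subst hst; simp
    · rw [List.count_singleton]
      have h1 : (s == t) = false := beq_eq_false_iff_ne.mpr (Ne.symm hst)
      rw [h1]
      have h2 : ¬ (t - s = 0) := by omega
      simp [h2]
  | succ i ih =>
    intro s t
    have hi : i < arr.length := by omega
    have hile : i ≤ arr.length := by omega
    have htake : arr.take (i + 1) = arr.take i ++ [arr[i]] := by
      rw [List.take_add_one]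
      simp [List.getElem?_eq_getElem hi]
    rw [leafL, List.count_append, htake, cnt_append]
    push_cast
    rw [ih hile s t, ih hile (s + arr.getD i 0) t]
    have hgd : arr.getD i 0 = arr[i] := List.getD_eq_getElem arr 0 hi
    rw [hgd]
    have : t - (s + arr[i]) = t - s - arr[i] := by ring
    rw [this]

-- Set.update by an injectively shifted list appends the genuinely new shifted values,
-- in first-appearance order of the originals
theorem update_map_shift (c : Int) (l : List Int) :
    ∀ S : PySem.Set Int,
      PySem.Set.update S (l.map (fun t => c + t)) =
        S ++ ((PySem.Set.ofList l).filter (fun t => !(S.contains (c + t)))).map (fun t => c + t) := by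
  induction l using List.reverseRecOn with
  | nil => intro S; simp [PySem.Set.update_nil]
  | append_singleton l x ih =>
    intro S
    rw [List.map_append, List.map_singleton, PySem.Set.update_append,
      PySem.Set.update_cons, PySem.Set.update_nil, ih S, PySem.Set.ofList_append_singleton]
    by_cases hx : x ∈ PySem.Set.ofList l
    · rw [PySem.Set.add_of_mem hx]
      apply PySem.Set.add_of_mem
      have hxl : x ∈ l := (PySem.Set.mem_ofList _ _).mp hx
      by_cases hS : c + x ∈ S
      · simp [hS]
      · refine List.mem_append.mpr (Or.inr ?_)
        refine List.mem_map.mpr ⟨x, ?_, rfl⟩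
        refine List.mem_filter.mpr ⟨hx, ?_⟩
        simp [PySem.Set.contains, hS]
    · rw [PySem.Set.add_of_not_mem hx, List.filter_append]
      by_cases hS : c + x ∈ S
      · rw [PySem.Set.add_of_mem (List.mem_append.mpr (Or.inl hS))]
        have hnil : List.filter (fun t => !(PySem.Set.contains S (c + t))) [x] = [] := by
          simp [PySem.Set.contains, hS]
        rw [hnil]
        simp
      · have hnotmem : c + x ∉ S ++ ((PySem.Set.ofList l).filter
            (fun t => !(PySem.Set.contains S (c + t)))).map (fun t => c + t) := by
          intro hmem
          rcases List.mem_append.mp hmem with h | h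
          · exact hS h
          · obtain ⟨t, ht, hteq⟩ := List.mem_map.mp h
            have : t = x := by omega
            subst this
            exact hx (List.mem_filter.mp ht).1
        rw [PySem.Set.add_of_not_mem hnotmem]
        have hone : List.filter (fun t => !(PySem.Set.contains S (c + t))) [x] = [x] := by
          simp [PySem.Set.contains, hS]
        rw [hone]
        simp [List.append_assoc]

theorem ofList_leafL (arr : List Int) (i : Nat) (h : i ≤ arr.length) :
    PySem.Set.ofList (leafL arr i 0) = ordF (arr.take i) := by
  induction i with
  | zero => simp [leafL, ordF, PySem.Set.ofList]
  | succ i ih =>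
    have hi : i < arr.length := by omega
    have hile : i ≤ arr.length := by omega
    have htake : arr.take (i + 1) = arr.take i ++ [arr[i]] := by
      rw [List.take_add_one]
      simp [List.getElem?_eq_getElem hi]
    have hgd : arr.getD i 0 = arr[i] := List.getD_eq_getElem arr 0 hi
    rw [leafL, leafL_shift arr i (0 + arr.getD i 0), PySem.Set.ofList_append,
      update_map_shift, htake, ih hile]
    have hord : ordF (arr.take i ++ [arr[i]]) = stepO (ordF (arr.take i)) arr[i] := by
      unfold ordF
      rw [List.foldl_append, List.foldl_cons, List.foldl_nil]
    rw [hord]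
    unfold stepO
    congr 1
    have hfil : (ordF (arr.take i)).filter
        (fun t => !(PySem.Set.contains (ordF (arr.take i)) (0 + arr.getD i 0 + t))) =
        (ordF (arr.take i)).filter (fun k => !(ordF (arr.take i)).contains (k + arr[i])) := by
      apply List.filter_congr
      intro k _
      have h1 : 0 + arr.getD i 0 + k = k + arr[i] := by rw [hgd]; ring
      rw [h1, PySem.Set.contains_eq_listContains]
    rw [hfil]
    apply List.map_congr_left
    intro t _
    rw [hgd]; ring

theorem dfs_alt_eq_canon (arr : List Int) :
    dfs_alt arr = (ordF arr).map (fun s => (s, cnt arr s)) := by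
  unfold dfs_alt
  rw [recB_eq_foldl, PySem.Dict.foldl_insert_getD_add_one_eq_counter,
    PySem.Dict.items_counter]
  have h1 := ofList_leafL arr arr.length (le_refl _)
  rw [List.take_length] at h1
  rw [h1]
  apply List.map_congr_left
  intro s _
  have h2 := count_leafL arr arr.length (le_refl _) 0 s
  rw [List.take_length] at h2
  have : s - 0 = s := by ring
  rw [this] at h2
  rw [h2]

-- ===== VERDICT (by name: the statement is the Claim_ definition above) =====
theorem dfs_spec : Claim_equal_dfs := by
  intro arr _
  unfold Spec_dfs
  rw [dfs_eq_canon, dfs_alt_eq_canon]
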